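-- pv_equiv track=rewrite | github.com/sdpython/pyquickhelper | src/pyquickhelper/pycode/readme_helper.py | clean_readme
-- ===== SOURCE A (Python) =====
-- def clean_readme(content):
--     """
--     Clean instructions such as ``.. only:: html``.
--
--     @param      content     content of an rst file
--     @return                 cleaned content
--     """
--     lines = content.split("\n")
--     indent = None
--     less = None
--     rows = []
--     for i, line in enumerate(lines):
--         sline = line.lstrip()
--         if sline.startswith(".. only:: html"):
--             indent = len(line) - len(sline)
--             continue
--         if indent is None:
--             rows.append(line)
--             continue
--         exp = indent * " "
--         if len(line) > indent + 1 and line[:indent] == exp: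
--             if line[indent] == " ":
--                 blank = sline.strip()
--                 if len(blank) == 0:
--                     rows.append("")  # pragma: no cover
--                     continue  # pragma: no cover
--                 if less is None:
--                     less = len(line) - len(sline)
--                     if less == indent:
--                         raise ValueError(  # pragma: no cover
--                             "Wrong format at line {0}\n{1}".format(
--                                 i, content))
--                 new_line = line[less - indent:]
--                 rows.append(new_line)
--             else:
--                 rows.append(line)
--                 indent = None
--                 less = None
--         else:
--             rows.append(line)
--     return "\n".join(rows)
-- ===== SOURCE B (Python) =====
-- def clean_readme(content):
--     """
--     Clean instructions such as ``.. only:: html``.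
--
--     @param      content     content of an rst file
--     @return                 cleaned content
--     """
--     MARK = ".. only:: html"
--     lines = content.split("\n")
--
--     def step(state, line):
--         # pure transition: state entering the next line
--         indent, less = state
--         s = line.lstrip()
--         if s.startswith(MARK):
--             return (len(line) - len(s), less)
--         if indent is None:
--             return state
--         if len(line) > indent + 1 and line[:indent + 1] == " " * (indent + 1):
--             if less is None and s.strip():
--                 return (indent, len(line) - len(s))
--             return state
--         if len(line) > indent + 1 and line[:indent] == " " * indent:
--             return (None, None)
--         return state
--
--     def render(state, line):
--         # what the line contributes to the output, given its entering state
--         indent, less = state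
--         s = line.lstrip()
--         if s.startswith(MARK):
--             return None
--         if indent is None:
--             return line
--         if len(line) > indent + 1 and line[:indent + 1] == " " * (indent + 1):
--             if not s.strip():
--                 return ""
--             if less is None:
--                 less = len(line) - len(s)
--             return line[less - indent:]
--         return line
--
--     # pass 1: the state entering each line (a prefix scan)
--     states = [(None, None)]
--     for line in lines:
--         states.append(step(states[-1], line))
--
--     # pass 2: render each line under its entering state, drop the markers
--     rows = [render(st, ln) for st, ln in zip(states, lines)]
--     return "\n".join(r for r in rows if r is not None)
-- ===== Notes on version B (the rewrite author's own statement) =====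
-- stated objective: alternative
-- what changed: Replaces A's single loop that interleaves state mutation with output appending by two staged passes: a pure prefix scan computing the (indent, less) state entering each line, then a stateless map+filter rendering each line under its entering state (markers dropped); the unreachable ValueError (a dedented body line forces less > indent) is omitted.
import Mathlib
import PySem

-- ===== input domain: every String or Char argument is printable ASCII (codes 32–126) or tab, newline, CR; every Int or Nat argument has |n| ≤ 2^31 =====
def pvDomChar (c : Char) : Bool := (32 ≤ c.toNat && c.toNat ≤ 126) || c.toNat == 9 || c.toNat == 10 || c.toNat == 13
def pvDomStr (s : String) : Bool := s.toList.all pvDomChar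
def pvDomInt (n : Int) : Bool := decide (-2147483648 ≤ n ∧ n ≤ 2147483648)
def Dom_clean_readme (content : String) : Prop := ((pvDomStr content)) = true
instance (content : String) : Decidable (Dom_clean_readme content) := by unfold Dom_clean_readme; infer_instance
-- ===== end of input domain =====

-- B replaces A's single loop, which interleaves state updates with output production,
-- by two staged passes: a prefix scan computing the state entering each line, then a
-- map+filter rendering each line under its entering state; same cost, different decomposition.

-- ===== PORT A =====
-- state: (indent : Option Nat, less : Option Nat, rows); the loop index i of A's
-- enumerate is only used in the ValueError message, which is unreachable
-- (line[indent] == ' ' forces less = len(line)-len(sline) ≥ indent+1 > indent),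
-- so the fold carries no index and the raise is omitted.
def cleanStepA (st : Option Nat × Option Nat × List (List Char)) (line : List Char) :
    Option Nat × Option Nat × List (List Char) :=
  let sline := PySem.Chars.lstrip line
  if PySem.Chars.startswith sline (".. only:: html".toList) then
    (some (line.length - sline.length), st.2.1, st.2.2)
  else
    match st.1 with
    | none => (none, st.2.1, st.2.2 ++ [line])
    | some indent =>
      let exp := List.replicate indent ' '
      if line.length > indent + 1 ∧ line.take indent = exp then
        if PySem.List.pyGet? line (indent : Int) = some ' ' then
          if PySem.Chars.strip sline = [] then
            (some indent, st.2.1, st.2.2 ++ [[]])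
          else
            let less := st.2.1.getD (line.length - sline.length)
            (some indent, some less, st.2.2 ++ [PySem.List.slice line (some ((less : Int) - indent)) none])
        else (none, none, st.2.2 ++ [line])
      else (some indent, st.2.1, st.2.2 ++ [line])

def clean_readme (content : String) : String :=
  let lines := PySem.Chars.splitOn content.toList ['\n']
  String.ofList (PySem.Chars.join ['\n'] (lines.foldl cleanStepA (none, none, [])).2.2)

-- ===== PORT B =====
-- pure transition: the state (indent, less) entering the next line
def stepB (st : Option Nat × Option Nat) (line : List Char) : Option Nat × Option Nat :=
  let s := PySem.Chars.lstrip line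
  if PySem.Chars.startswith s (".. only:: html".toList) then
    (some (line.length - s.length), st.2)
  else
    match st.1 with
    | none => st
    | some indent =>
      if line.length > indent + 1 ∧ line.take (indent + 1) = List.replicate (indent + 1) ' ' then
        if st.2 = none ∧ PySem.Chars.strip s ≠ [] then (some indent, some (line.length - s.length))
        else st
      else if line.length > indent + 1 ∧ line.take indent = List.replicate indent ' ' then
        (none, none)
      else st

-- what the line contributes to the output, given its entering state (none = dropped marker)
def renderB (st : Option Nat × Option Nat) (line : List Char) : Option (List Char) :=
  let s := PySem.Chars.lstrip line
  if PySem.Chars.startswith s (".. only:: html".toList) then none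
  else
    match st.1 with
    | none => some line
    | some indent =>
      if line.length > indent + 1 ∧ line.take (indent + 1) = List.replicate (indent + 1) ' ' then
        if PySem.Chars.strip s = [] then some []
        else
          let less := st.2.getD (line.length - s.length)
          some (PySem.List.slice line (some ((less : Int) - indent)) none)
      else some line

def clean_readme_alt (content : String) : String :=
  let lines := PySem.Chars.splitOn content.toList ['\n']
  let states := List.scanl stepB (none, none) lines
  let rows := (states.zip lines).map (fun p => renderB p.1 p.2)
  String.ofList (PySem.Chars.join ['\n'] (rows.filterMap id))

-- ===== PRECONDITION & SPEC =====
def Spec_clean_readme (content : String) (out : String) : Prop := out = clean_readme_alt content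
instance (content : String) (out : String) : Decidable (Spec_clean_readme content out) := by unfold Spec_clean_readme; infer_instance

-- ===== CLAIM =====
def Claim_equal_clean_readme : Prop := ∀ (content : String), Dom_clean_readme content → Spec_clean_readme content (clean_readme content)

-- ===== LEMMAS AND PROOFS =====

-- A's prefix test 'line[:n] == n*" "' as a prefix relation
theorem take_eq_iff_prefix (line : List Char) (n : Nat) :
    line.take n = List.replicate n ' ' ↔ List.replicate n ' ' <+: line := by
  rw [List.prefix_iff_eq_take, List.length_replicate, eq_comm]

-- A's "line[n] == ' '" under the n-space prefix equals the (n+1)-space prefix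
theorem pyGet_iff_prefix (line : List Char) (n : Nat)
    (hpre : List.replicate n ' ' <+: line) :
    PySem.List.pyGet? line (n : Int) = some ' ' ↔
      (List.replicate n ' ' ++ [' ']) <+: line := by
  obtain ⟨t, rfl⟩ := hpre
  rw [List.prefix_append_right_inj]
  cases t with
  | nil => simp [PySem.List.pyGet?, PySem.List.pyIdx?]
  | cons c t' => simp [List.cons_prefix_cons, eq_comm]

-- A's compound test (n-space prefix AND line[n]==' ') equals B's (n+1)-space prefix test
theorem prefix_succ_iff (line : List Char) (n : Nat) :
    (line.take n = List.replicate n ' ' ∧ PySem.List.pyGet? line (n : Int) = some ' ') ↔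
      line.take (n + 1) = List.replicate (n + 1) ' ' := by
  rw [take_eq_iff_prefix, take_eq_iff_prefix, List.replicate_succ' ]
  constructor
  · rintro ⟨h1, h2⟩
    exact (pyGet_iff_prefix line n h1).1 h2
  · intro h
    have h1 : List.replicate n ' ' <+: line :=
      (List.prefix_append (List.replicate n ' ') [' ']).trans h
    exact ⟨h1, (pyGet_iff_prefix line n h1).2 h⟩

-- one line of A's loop = B's transition plus B's rendered contribution
theorem step_decomp (ind less : Option Nat) (acc : List (List Char)) (line : List Char) :
    cleanStepA (ind, less, acc) line =
      ((stepB (ind, less) line).1, (stepB (ind, less) line).2,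
        acc ++ (renderB (ind, less) line).toList) := by
  simp only [cleanStepA, stepB, renderB]
  by_cases hm : PySem.Chars.startswith (PySem.Chars.lstrip line) (".. only:: html".toList) = true
  · simp only [if_pos hm]
    simp
  · simp only [if_neg hm]
    cases ind with
    | none => simp
    | some indent =>
      simp only
      by_cases hc1 : line.length > indent + 1 ∧ line.take indent = List.replicate indent ' '
      · by_cases hc2 : PySem.List.pyGet? line (indent : Int) = some ' '
        · have hb1 : line.length > indent + 1 ∧
              line.take (indent + 1) = List.replicate (indent + 1) ' ' :=
            ⟨hc1.1, (prefix_succ_iff line indent).1 ⟨hc1.2, hc2⟩⟩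
          by_cases hbl : PySem.Chars.strip (PySem.Chars.lstrip line) = []
          · simp [hc1, hc2, hb1, hbl]
          · cases less with
            | none => simp [hc1, hc2, hb1, hbl]
            | some l => simp [hc1, hc2, hb1, hbl]
        · have hb1 : ¬(line.length > indent + 1 ∧
              line.take (indent + 1) = List.replicate (indent + 1) ' ') := by
            rintro ⟨hlen, ht⟩
            exact hc2 ((prefix_succ_iff line indent).2 ht).2
          have ht1 : ¬ List.take (indent + 1) line = List.replicate (indent + 1) ' ' :=
            fun ht => hb1 ⟨hc1.1, ht⟩
          have hc2' := hc2
          simp only [PySem.List.pyGet?_natCast] at hc2'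
          simp [hc1, hc2', ht1]
      · have hb1 : ¬(line.length > indent + 1 ∧
            line.take (indent + 1) = List.replicate (indent + 1) ' ') := by
          rintro ⟨hlen, ht⟩
          exact hc1 ⟨hlen, ((prefix_succ_iff line indent).2 ht).1⟩
        simp [hc1, hb1]

theorem main_fold (lines : List (List Char)) :
    ∀ (st : Option Nat × Option Nat) (acc : List (List Char)),
      (lines.foldl cleanStepA (st.1, st.2, acc)).2.2 =
        acc ++ (((List.scanl stepB st lines).zip lines).map
          (fun p => renderB p.1 p.2)).filterMap id := by
  induction lines with
  | nil => simp
  | cons line rest ih =>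
    intro st acc
    obtain ⟨ind, less⟩ := st
    rw [List.foldl_cons, step_decomp, ih (stepB (ind, less) line)]
    cases h : renderB (ind, less) line <;>
      simp [h, List.scanl_cons, List.append_assoc]

-- ===== VERDICT =====
theorem clean_readme_spec : Claim_equal_clean_readme := by
  intro content _
  unfold Spec_clean_readme clean_readme clean_readme_alt
  simp only
  rw [main_fold _ (none, none)]
  simp
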